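-- pv_equiv track=rewrite | github.com/Syntax-Programmer/ChessGame | ChessGame/Game/Engine.py | sliding_address_filter
-- ===== SOURCE A (Python) =====
-- from typing import List, Tuple, Dict, Literal
--
-- INT_RANGE = Literal[0, 1, 2, 3, 4, 5, 6, 7]
--
-- def sliding_address_filter(
--     constructor: Tuple[INT_RANGE, INT_RANGE],
--     to_filter: List[Tuple[INT_RANGE, INT_RANGE]],
--     occupied_squares: Dict[Tuple[INT_RANGE, INT_RANGE], str],
-- ) -> List[Tuple[INT_RANGE, INT_RANGE] | None]:
--     """
--     Filter the given general address of a sliding piece.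
--
--     Takes in a generally made sliding address and restricts it to only those squares
--     that the piece on the provided constructor can move to.
--
--     Parameters:
--     ----------
--     1. constructor : Tuple[INT_RANGE, INT_RANGE]
--         A location on the board w.r.t the address was made.
--     2. to_filter : List[Tuple[INT_RANGE, INT_RANGE]]
--         A address that was made w.r.t constructor and is to be filtered.
--     3. occupied_squares : Dict[Tuple[INT_RANGE, INT_RANGE], str]
--         A dictionary of all the occupied squares mapped to the piece occupying that square.
--
--     Returns:
--     -------
--     List[Tuple[INT_RANGE, INT_RANGE]] :
--         The filtered address only containing the reachable squares
--     """
--     left_reach_index = 0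
--     right_reach_index = len(to_filter) - 1
--     constructor_index = to_filter.index(constructor)
--     for indices in range(len(to_filter)):
--         if indices < constructor_index and to_filter[indices] in occupied_squares:
--             left_reach_index = indices
--         if indices > constructor_index and to_filter[indices] in occupied_squares:
--             right_reach_index = indices
--             # Because we need the first occurrence of a piece to the right of the gives constructor.
--             break
--     to_filter = to_filter[left_reach_index : right_reach_index + 1]
--     # Because a piece can't move to it's own location.
--     to_filter.remove(constructor)
--     return to_filter
-- ===== SOURCE B (Python) =====
-- def sliding_address_filter(constructor, to_filter, occupied_squares):
--     constructor_index = to_filter.index(constructor)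
--     # Left bound: nearest occupied square strictly before the pivot (else 0).
--     left = 0
--     j = constructor_index - 1
--     while j >= 0:
--         if to_filter[j] in occupied_squares:
--             left = j
--             break
--         j -= 1
--     # Right bound: nearest occupied square strictly after the pivot (else last index).
--     right = len(to_filter) - 1
--     j = constructor_index + 1
--     while j < len(to_filter):
--         if to_filter[j] in occupied_squares:
--             right = j
--             break
--         j += 1
--     result = to_filter[left : right + 1]
--     result.remove(constructor)
--     return result
-- ===== Notes on version B (the rewrite author's own statement) =====
-- stated objective: alternative
-- what changed: Replaces A's single forward sweep over the whole list (tracking the last blocker before the pivot and breaking on the first after it) with two pivot-anchored directional scans: backward from the pivot for the left bound with early exit, forward for the right bound.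
import Mathlib
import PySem

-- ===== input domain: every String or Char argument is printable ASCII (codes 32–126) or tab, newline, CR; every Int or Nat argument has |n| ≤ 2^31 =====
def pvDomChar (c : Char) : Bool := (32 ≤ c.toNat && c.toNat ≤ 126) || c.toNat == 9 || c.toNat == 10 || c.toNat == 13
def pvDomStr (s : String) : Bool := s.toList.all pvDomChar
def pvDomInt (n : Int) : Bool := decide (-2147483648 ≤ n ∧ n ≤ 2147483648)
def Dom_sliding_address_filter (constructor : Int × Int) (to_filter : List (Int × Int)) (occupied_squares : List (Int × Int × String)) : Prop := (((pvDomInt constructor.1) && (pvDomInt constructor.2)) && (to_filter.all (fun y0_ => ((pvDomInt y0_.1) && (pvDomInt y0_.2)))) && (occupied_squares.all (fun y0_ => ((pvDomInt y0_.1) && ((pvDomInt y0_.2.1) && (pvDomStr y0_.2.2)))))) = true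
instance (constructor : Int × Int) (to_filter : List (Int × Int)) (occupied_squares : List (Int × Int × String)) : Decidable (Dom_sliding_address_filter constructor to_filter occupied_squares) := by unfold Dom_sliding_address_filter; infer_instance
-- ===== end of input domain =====

-- B replaces A's single forward sweep over the whole list (tracking the last blocker before
-- the pivot and breaking at the first one after it) by two scans anchored at the pivot:
-- backward with early exit for the left bound, forward for the right bound. Same cost class.

-- `p in occupied_squares` for the Python dict (key membership; keys are the (Int × Int) part)
def pvOccMem (occ : List (Int × Int × String)) (p : Int × Int) : Bool :=
  occ.any (fun e => (e.1, e.2.1) == p)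

-- ===== PORT A =====
-- A's single `for indices in range(len(to_filter))` loop, with the `break` as an early return.
-- Indices are always in range where Python reads `to_filter[indices]`, so `getD` is exact.
def pvALoop (tf : List (Int × Int)) (occ : List (Int × Int × String)) (ci : Nat)
    (i left right : Nat) : Nat × Nat :=
  if i < tf.length then
    let left' := if i < ci ∧ pvOccMem occ (tf.getD i (0, 0)) then i else left
    if ci < i ∧ pvOccMem occ (tf.getD i (0, 0)) then (left', i)
    else pvALoop tf occ ci (i + 1) left' right
  else (left, right)
termination_by tf.length - i

def sliding_address_filter (constructor : Int × Int) (to_filter : List (Int × Int)) (occupied_squares : List (Int × Int × String)) : List (Int × Int) :=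
  match PySem.List.index? to_filter constructor with
  | none => []  -- Python raises ValueError here; excluded by Pre_
  | some ci =>
    let lr := pvALoop to_filter occupied_squares ci 0 0 (to_filter.length - 1)
    match PySem.List.remove? (PySem.List.slice to_filter (some (lr.1 : Int)) (some ((lr.2 : Int) + 1))) constructor with
    | none => []  -- unreachable: the slice always contains the pivot
    | some res => res

-- ===== PORT B =====
-- backward `while j >= 0` scan from ci-1; at j = 0 the loop result is 0 whether or not
-- to_filter[0] is occupied, which is what the `| 0 => 0` case returns.
def pvBLeft (tf : List (Int × Int)) (occ : List (Int × Int × String)) : Nat → Nat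
  | 0 => 0
  | j + 1 => if pvOccMem occ (tf.getD (j + 1) (0, 0)) then j + 1 else pvBLeft tf occ j

-- forward `while j < len(to_filter)` scan from ci+1
def pvBRight (tf : List (Int × Int)) (occ : List (Int × Int × String)) (j : Nat) : Nat :=
  if j < tf.length then
    if pvOccMem occ (tf.getD j (0, 0)) then j else pvBRight tf occ (j + 1)
  else tf.length - 1
termination_by tf.length - j

def sliding_address_filter_alt (constructor : Int × Int) (to_filter : List (Int × Int)) (occupied_squares : List (Int × Int × String)) : List (Int × Int) :=
  match PySem.List.index? to_filter constructor with
  | none => []  -- ValueError; excluded by Pre_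
  | some ci =>
    let l := pvBLeft to_filter occupied_squares (ci - 1)
    let r := pvBRight to_filter occupied_squares (ci + 1)
    match PySem.List.remove? (PySem.List.slice to_filter (some (l : Int)) (some ((r : Int) + 1))) constructor with
    | none => []  -- unreachable
    | some res => res

-- ===== PRECONDITION & SPEC =====
-- A raises ValueError (`.index`) exactly when constructor is not in to_filter; only those inputs are excluded.
def Pre_sliding_address_filter (constructor : Int × Int) (to_filter : List (Int × Int)) (occupied_squares : List (Int × Int × String)) : Prop :=
  constructor ∈ to_filter
instance (constructor : Int × Int) (to_filter : List (Int × Int)) (occupied_squares : List (Int × Int × String)) : Decidable (Pre_sliding_address_filter constructor to_filter occupied_squares) := by unfold Pre_sliding_address_filter; infer_instance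

def pvWitness_sliding_address_filter : (Int × Int) × (List (Int × Int)) × (List (Int × Int × String)) :=
  ((1, 1), [(0, 0), (1, 1), (2, 2)], [(2, 2, "p")])

def Spec_sliding_address_filter (constructor : Int × Int) (to_filter : List (Int × Int)) (occupied_squares : List (Int × Int × String)) (out : List (Int × Int)) : Prop := out = sliding_address_filter_alt constructor to_filter occupied_squares
instance (constructor : Int × Int) (to_filter : List (Int × Int)) (occupied_squares : List (Int × Int × String)) (out : List (Int × Int)) : Decidable (Spec_sliding_address_filter constructor to_filter occupied_squares out) := by unfold Spec_sliding_address_filter; infer_instance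

-- ===== CLAIM (what is proved, stated in full; the proofs are below) =====
def Claim_equal_sliding_address_filter : Prop := ∀ (constructor : Int × Int) (to_filter : List (Int × Int)) (occupied_squares : List (Int × Int × String)), Dom_sliding_address_filter constructor to_filter occupied_squares → Pre_sliding_address_filter constructor to_filter occupied_squares → Spec_sliding_address_filter constructor to_filter occupied_squares (sliding_address_filter constructor to_filter occupied_squares)

-- ===== LEMMAS AND PROOFS =====

-- accumulated left bound of A's loop over indices [i, ci)
def pvGLeft (tf : List (Int × Int)) (occ : List (Int × Int × String)) (ci : Nat) (i l : Nat) : Nat :=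
  if i < ci then pvGLeft tf occ ci (i + 1) (if pvOccMem occ (tf.getD i (0, 0)) then i else l) else l
termination_by ci - i

-- past the pivot, A's loop leaves `left` alone and returns B's forward scan
lemma pvALoop_phase2 (tf : List (Int × Int)) (occ : List (Int × Int × String)) (ci : Nat) :
    ∀ k i l, tf.length - i ≤ k → ci < i →
      pvALoop tf occ ci i l (tf.length - 1) = (l, pvBRight tf occ i) := by
  intro k
  induction k with
  | zero =>
    intro i l hk hci
    rw [pvALoop, pvBRight, if_neg (by omega : ¬ i < tf.length), if_neg (by omega : ¬ i < tf.length)]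
  | succ k ih =>
    intro i l hk hci
    rw [pvALoop, pvBRight]
    by_cases h : i < tf.length
    · rw [if_pos h, if_pos h,
        if_neg (fun hc => absurd hc.1 (by omega) : ¬ (i < ci ∧ pvOccMem occ (tf.getD i (0, 0)) = true))]
      by_cases hocc : pvOccMem occ (tf.getD i (0, 0)) = true
      · rw [if_pos ⟨hci, hocc⟩, if_pos hocc]
      · rw [if_neg (fun hc => absurd hc.2 hocc), if_neg hocc]
        exact ih (i + 1) l (by omega) (by omega)
    · rw [if_neg h, if_neg h]

-- up to the pivot, A's loop only accumulates the left bound (pvGLeft)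
lemma pvALoop_phase1 (tf : List (Int × Int)) (occ : List (Int × Int × String)) (ci : Nat)
    (hci : ci < tf.length) :
    ∀ k i l, ci - i ≤ k → i ≤ ci →
      pvALoop tf occ ci i l (tf.length - 1)
        = pvALoop tf occ ci (ci + 1) (pvGLeft tf occ ci i l) (tf.length - 1) := by
  intro k
  induction k with
  | zero =>
    intro i l hk hici
    have hie : i = ci := by omega
    subst hie
    rw [pvALoop, pvGLeft, if_pos (by omega : i < tf.length),
      if_neg (fun hc => absurd hc.1 (by omega) : ¬ (i < i ∧ pvOccMem occ (tf.getD i (0, 0)) = true)),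
      if_neg (fun hc => absurd hc.1 (by omega) : ¬ (i < i ∧ pvOccMem occ (tf.getD i (0, 0)) = true)),
      if_neg (by omega : ¬ i < i)]
  | succ k ih =>
    intro i l hk hici
    by_cases hlt : i < ci
    · rw [pvALoop, pvGLeft, if_pos (by omega : i < tf.length), if_pos hlt,
        if_neg (fun hc => absurd hc.1 (by omega) : ¬ (ci < i ∧ pvOccMem occ (tf.getD i (0, 0)) = true))]
      by_cases hocc : pvOccMem occ (tf.getD i (0, 0)) = true
      · rw [if_pos ⟨hlt, hocc⟩, if_pos hocc]
        exact ih (i + 1) i (by omega) (by omega)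
      · rw [if_neg (fun hc => absurd hc.2 hocc), if_neg hocc]
        exact ih (i + 1) l (by omega) (by omega)
    · have hie : i = ci := by omega
      subst hie
      rw [pvALoop, pvGLeft, if_pos (by omega : i < tf.length),
        if_neg (fun hc => absurd hc.1 (by omega) : ¬ (i < i ∧ pvOccMem occ (tf.getD i (0, 0)) = true)),
        if_neg (fun hc => absurd hc.1 (by omega) : ¬ (i < i ∧ pvOccMem occ (tf.getD i (0, 0)) = true)),
        if_neg (by omega : ¬ i < i)]

-- the forward accumulation from i with seed pvBLeft (i-1) equals B's backward scan from ci-1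
lemma pvGLeft_eq_bLeft (tf : List (Int × Int)) (occ : List (Int × Int × String)) (ci : Nat) :
    ∀ k i, ci - i ≤ k → i ≤ ci →
      pvGLeft tf occ ci i (pvBLeft tf occ (i - 1)) = pvBLeft tf occ (ci - 1) := by
  intro k
  induction k with
  | zero =>
    intro i hk hici
    have hie : i = ci := by omega
    subst hie
    rw [pvGLeft, if_neg (by omega : ¬ i < i)]
  | succ k ih =>
    intro i hk hici
    by_cases hlt : i < ci
    · rw [pvGLeft, if_pos hlt]
      have hseed : (if pvOccMem occ (tf.getD i (0, 0)) = true then i else pvBLeft tf occ (i - 1))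
          = pvBLeft tf occ ((i + 1) - 1) := by
        cases i with
        | zero => rw [pvBLeft]; split <;> rfl
        | succ j => rfl
      rw [hseed]
      exact ih (i + 1) (by omega) (by omega)
    · have hie : i = ci := by omega
      subst hie
      rw [pvGLeft, if_neg (by omega : ¬ i < i)]

-- ===== VERDICT (by name: the statement is the Claim_ definition above) =====
theorem sliding_address_filter_spec : Claim_equal_sliding_address_filter := by
  intro c tf occ _ hpre
  unfold Spec_sliding_address_filter
  obtain ⟨ci, hidx⟩ := Option.isSome_iff_exists.mp
    ((PySem.List.index?_isSome_iff (xs := tf) (v := c)).mpr hpre)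
  obtain ⟨hci, -, -⟩ := PySem.List.getElem_of_index?_eq_some hidx
  unfold sliding_address_filter sliding_address_filter_alt
  rw [hidx]
  dsimp only
  have h3 : pvGLeft tf occ ci 0 0 = pvBLeft tf occ (ci - 1) := by
    have := pvGLeft_eq_bLeft tf occ ci ci 0 (by omega) (by omega)
    rwa [show pvBLeft tf occ (0 - 1) = 0 from rfl] at this
  rw [pvALoop_phase1 tf occ ci hci ci 0 0 (by omega) (by omega),
    pvALoop_phase2 tf occ ci (tf.length - ci) (ci + 1) (pvGLeft tf occ ci 0 0) (by omega) (by omega),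
    h3]
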